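-- pv_equiv track=rewrite | github.com/CombiRWTH/StaffScheduling | src/web/analyze_solution.py | calculate_consecutive_night_shifts
-- ===== SOURCE A (Python) =====
-- from typing import Dict, List
--
-- def calculate_consecutive_night_shifts(shifts_assigned: List[int]) -> int:
--     night_streak = 0
--     violations = 0
--     for s in shifts_assigned:
--         if s == 2:
--             night_streak += 1
--         else:
--             if night_streak > 3:
--                 violations += 1
--             night_streak = 0
--     if night_streak > 3:
--         violations += 1
--     return violations
-- ===== SOURCE B (Python) =====
-- def calculate_consecutive_night_shifts(shifts_assigned):
--     # A violation is a maximal run of 2s longer than 3; count each by its start: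
--     # a position whose previous element is not a 2 and that begins four consecutive 2s.
--     s = shifts_assigned
--     prevs = [None] + s
--     return sum(1 for p, a, b, c, d in zip(prevs, s, s[1:], s[2:], s[3:])
--                if p != 2 and a == b == c == d == 2)
-- ===== Notes on version B (the rewrite author's own statement) =====
-- stated objective: alternative
-- what changed: Replaced A's stateful streak accumulator with a stateless sliding-window stencil over zipped shifted copies of the list, counting positions that start four consecutive 2s and are not preceded by a 2.
import Mathlib
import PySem

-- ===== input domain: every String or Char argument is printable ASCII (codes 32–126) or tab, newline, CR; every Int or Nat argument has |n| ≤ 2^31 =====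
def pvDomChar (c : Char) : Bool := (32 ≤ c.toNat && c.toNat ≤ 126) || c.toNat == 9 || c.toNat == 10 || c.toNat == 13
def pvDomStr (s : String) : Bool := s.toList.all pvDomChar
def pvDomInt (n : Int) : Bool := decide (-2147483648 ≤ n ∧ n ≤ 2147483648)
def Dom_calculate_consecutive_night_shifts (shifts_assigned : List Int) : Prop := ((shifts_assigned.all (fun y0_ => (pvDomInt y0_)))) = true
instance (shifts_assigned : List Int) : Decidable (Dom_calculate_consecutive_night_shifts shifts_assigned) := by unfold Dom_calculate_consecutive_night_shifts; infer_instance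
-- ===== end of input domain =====

-- B replaces A's streak accumulator + post-loop flush with a stateless sliding-window
-- stencil over zipped shifted copies, counting run starts of >= 4 twos; same O(n) cost.


-- ===== PORT A =====
-- literal port of A: fold carrying (night_streak, violations), then the final flush
def calculate_consecutive_night_shifts (shifts_assigned : List Int) : Int :=
  let st := shifts_assigned.foldl
    (fun (p : Int × Int) s =>
      if s = 2 then (p.1 + 1, p.2)
      else (0, if p.1 > 3 then p.2 + 1 else p.2))
    (0, 0)
  if st.1 > 3 then st.2 + 1 else st.2

-- ===== PORT B =====
-- port of B: zip the list with [None]+s and its shifted copies s[1:], s[2:], s[3:]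
-- (s[k:] on a list with k ≥ 0 is exactly List.drop k), count windows (p,a,b,c,d)
-- with p != 2 and a==b==c==d==2
def calculate_consecutive_night_shifts_alt (shifts_assigned : List Int) : Int :=
  let s := shifts_assigned
  let prevs : List (Option Int) := none :: s.map some
  ((List.zip prevs (List.zip s (List.zip (s.drop 1) (List.zip (s.drop 2) (s.drop 3))))).countP
    (fun q => (q.1 != some 2) && (q.2.1 == 2) && (q.2.2.1 == 2) && (q.2.2.2.1 == 2) && (q.2.2.2.2 == 2)) : ℕ)

-- ===== PRECONDITION & SPEC =====
def Spec_calculate_consecutive_night_shifts (shifts_assigned : List Int) (out : Int) : Prop := out = calculate_consecutive_night_shifts_alt shifts_assigned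
instance (shifts_assigned : List Int) (out : Int) : Decidable (Spec_calculate_consecutive_night_shifts shifts_assigned out) := by unfold Spec_calculate_consecutive_night_shifts; infer_instance

-- ===== CLAIM (what is proved, stated in full; the proofs are below) =====
def Claim_equal_calculate_consecutive_night_shifts : Prop := ∀ (shifts_assigned : List Int), Dom_calculate_consecutive_night_shifts shifts_assigned → Spec_calculate_consecutive_night_shifts shifts_assigned (calculate_consecutive_night_shifts shifts_assigned)

-- ===== LEMMAS AND PROOFS =====

-- element-by-element recount of A's loop, carrying the current streak
def runA (streak : Int) : List Int → Int
  | [] => if streak > 3 then 1 else 0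
  | s :: rest =>
    if s = 2 then runA (streak + 1) rest
    else (if streak > 3 then 1 else 0) + runA 0 rest

-- lead4 k xs: the first k elements of xs exist and are all 2
def lead4 : ℕ → List Int → Bool
  | 0, _ => true
  | _+1, [] => false
  | k+1, x :: t => (x == 2) && lead4 k t

-- stateless recount of B: count positions that start four 2s, given whether the
-- previous element was a 2
def fCount (prev2 : Bool) : List Int → Int
  | [] => 0
  | x :: t => (if !prev2 && lead4 4 (x :: t) then 1 else 0) + fCount (x == 2) t

-- B's zip-count with an arbitrary padding head, for the induction
def zipCount (p : Option Int) (s : List Int) : Int :=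
  ((List.zip (p :: s.map some) (List.zip s (List.zip (s.drop 1) (List.zip (s.drop 2) (s.drop 3))))).countP
    (fun q => (q.1 != some 2) && (q.2.1 == 2) && (q.2.2.1 == 2) && (q.2.2.2.1 == 2) && (q.2.2.2.2 == 2)) : ℕ)

theorem foldl_flush (xs : List Int) : ∀ (streak v : Int),
    (let st := xs.foldl
      (fun (p : Int × Int) s =>
        if s = 2 then (p.1 + 1, p.2)
        else (0, if p.1 > 3 then p.2 + 1 else p.2)) (streak, v)
     if st.1 > 3 then st.2 + 1 else st.2) = v + runA streak xs := by
  induction xs with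
  | nil => intro streak v; simp [runA]; split_ifs <;> ring
  | cons s rest ih =>
    intro streak v
    simp only [List.foldl_cons, runA]
    by_cases hs : s = 2
    · simp [hs, ih]
    · simp only [hs, if_false, ih]
      split_ifs <;> ring

theorem runA_eq_fCount : ∀ (xs : List Int) (s : ℕ),
    runA (s : ℤ) xs
      = (if 4 ≤ s ∨ (1 ≤ s ∧ lead4 (4 - s) xs = true) then 1 else 0)
        + fCount (decide (1 ≤ s)) xs := by
  intro xs
  induction xs with
  | nil =>
    intro s
    simp only [runA, fCount, add_zero]
    by_cases h4 : 4 ≤ s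
    · have : ((s : ℤ) > 3) := by exact_mod_cast h4
      simp [this, h4]
    · have : ¬ ((s : ℤ) > 3) := by omega
      have hl : (4 - s) ≠ 0 := by omega
      rcases Nat.exists_eq_succ_of_ne_zero hl with ⟨k, hk⟩
      simp [this, h4, hk, lead4]
  | cons x t ih =>
    intro s
    by_cases hx : x = 2
    · subst hx
      have e1 : runA (s : ℤ) (2 :: t) = runA ((s + 1 : ℕ) : ℤ) t := by
        simp only [runA]
        push_cast
        ring_nf
      rw [e1, ih (s + 1)]
      simp only [fCount]
      by_cases h4 : 4 ≤ s
      · have h4' : 4 ≤ s + 1 := by omega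
        have h1 : 1 ≤ s := by omega
        simp [h4, h4', h1]
      · by_cases h1 : 1 ≤ s
        · -- 1 ≤ s ≤ 3 : lead4 (4-s) (2::t) = lead4 (3-s) t, and 4-(s+1) = 3-s
          have hk : 4 - s = (3 - s) + 1 := by omega
          have hlead : lead4 (4 - s) (2 :: t) = lead4 (3 - s) t := by
            rw [hk]; simp [lead4]
          have hk2 : 4 - (s + 1) = 3 - s := by omega
          simp only [hk2, hlead]
          by_cases h4' : 4 ≤ s + 1
          · have h3 : s = 3 := by omega
            subst h3
            simp [lead4]
          · have h1' : 1 ≤ s + 1 := by omega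
            simp [h4, h4', h1, h1']
        · -- s = 0
          have hs0 : s = 0 := by omega
          subst hs0
          have hlead : lead4 4 (2 :: t) = lead4 3 t := by simp [lead4]
          have hk2 : 4 - (0 + 1) = 3 := by omega
          simp only [hk2, hlead]
          by_cases hl : lead4 3 t = true <;> simp [hl]
    · have e1 : runA (s : ℤ) (x :: t) = (if (s : ℤ) > 3 then 1 else 0) + runA 0 t := by
        simp [runA, hx]
      have e2 : runA (0 : ℤ) t = fCount false t := by
        have := ih 0
        simpa using this
      rw [e1, e2]
      simp only [fCount]
      have hxb : (x == 2) = false := by simp [hx]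
      have hw : lead4 4 (x :: t) = false := by simp [lead4, hx]
      by_cases h4 : 4 ≤ s
      · have h3 : ((s : ℤ) > 3) := by exact_mod_cast h4
        have h1 : 1 ≤ s := by omega
        simp [h3, h4, h1, hxb, hw]
      · have h3 : ¬ ((s : ℤ) > 3) := by omega
        by_cases h1 : 1 ≤ s
        · have hl : (4 - s) ≠ 0 := by omega
          rcases Nat.exists_eq_succ_of_ne_zero hl with ⟨k, hk⟩
          simp [h3, h4, h1, hxb, hk, lead4]
        · simp [h3, h4, h1, hxb, hw]

theorem zip_eq_fCount : ∀ (n : ℕ) (xs : List Int), xs.length ≤ n → ∀ p,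
    zipCount p xs = fCount (p == some 2) xs := by
  intro n
  induction n with
  | zero =>
    intro xs h p
    have hx : xs = [] := List.length_eq_zero_iff.mp (Nat.le_zero.mp h)
    subst hx
    rfl
  | succ n ih =>
    intro xs h p
    match xs with
    | [] => rfl
    | x :: a :: b :: c :: r =>
      have hlen : (a :: b :: c :: r).length ≤ n := by simp at h ⊢; omega
      have htail := ih (a :: b :: c :: r) hlen (some x)
      simp only [zipCount, List.map_cons, List.drop_succ_cons, List.drop_zero,
        List.zip_cons_cons, List.countP_cons] at htail ⊢
      push_cast
      rw [htail]
      simp only [fCount, lead4]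
      by_cases hp : p = some 2 <;>
        by_cases hx2 : x = 2 <;>
        by_cases ha : a = 2 <;>
        by_cases hb : b = 2 <;>
        by_cases hc : c = 2 <;>
        simp [hp, hx2, ha, hb, hc] <;> try ring
    | [x] =>
      simp [zipCount, fCount, lead4]
    | [x, a] =>
      simp [zipCount, fCount, lead4]
    | [x, a, b] =>
      simp [zipCount, fCount, lead4]

theorem alt_eq_zipCount (xs : List Int) :
    calculate_consecutive_night_shifts_alt xs = zipCount none xs := rfl

-- ===== VERDICT (by name: the statement is the Claim_ definition above) =====
theorem calculate_consecutive_night_shifts_spec : Claim_equal_calculate_consecutive_night_shifts := by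
  intro xs _
  unfold Spec_calculate_consecutive_night_shifts calculate_consecutive_night_shifts
  rw [foldl_flush xs 0 0, zero_add, alt_eq_zipCount,
    zip_eq_fCount xs.length xs le_rfl none]
  have := runA_eq_fCount xs 0
  simpa using this
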